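-- pv_equiv track=rewrite | github.com/juangz1912/Grupo_JJJS | taller_4_JJJS/Ejercicio2_voraz.py | min_operaciones
-- ===== SOURCE A (Python) =====
-- def min_operaciones(N):
--     operaciones = 0
--
--     while N > 0:
--         if N % 2 == 0:
--             N //= 2
--         else:
--             N -= 1
--         operaciones += 1
--     return operaciones
-- ===== SOURCE B (Python) =====
-- def min_operaciones(N):
--     if N <= 0:
--         return 0
--     return (N.bit_length() - 1) + bin(N).count('1')
-- ===== Notes on version B (the rewrite author's own statement) =====
-- stated objective: simpler
-- what changed: Replaces the step-by-step halve/decrement loop with the closed form bit_length(N)-1 + popcount(N) (one halving step per bit position plus one decrement per set bit), with 0 for N <= 0.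
import Mathlib
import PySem

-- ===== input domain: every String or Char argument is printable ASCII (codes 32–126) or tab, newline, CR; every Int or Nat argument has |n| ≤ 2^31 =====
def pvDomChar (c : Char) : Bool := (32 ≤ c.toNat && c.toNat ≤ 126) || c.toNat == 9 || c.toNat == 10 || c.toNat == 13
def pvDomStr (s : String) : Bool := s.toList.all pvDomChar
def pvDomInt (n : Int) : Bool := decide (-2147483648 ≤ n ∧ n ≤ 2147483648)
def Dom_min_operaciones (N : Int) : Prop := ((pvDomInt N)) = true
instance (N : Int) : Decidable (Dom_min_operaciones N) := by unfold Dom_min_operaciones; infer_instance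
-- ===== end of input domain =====

-- B replaces A's halve/decrement loop by the closed form bit_length(N)-1 + popcount(N) (0 for N ≤ 0): simpler, no loop.

-- ===== PORT A =====
-- the while-loop of A, carrying the 'operaciones' accumulator
def minOpsGo (N : Int) (operaciones : Int) : Int :=
  if N > 0 then
    if PySem.Int.mod N 2 = 0 then
      minOpsGo (PySem.Int.floordiv N 2) (operaciones + 1)
    else
      minOpsGo (N - 1) (operaciones + 1)
  else
    operaciones
termination_by N.toNat
decreasing_by
  · rw [PySem.Int.floordiv_eq_ediv_of_pos (by omega)]; omega
  · omega

def min_operaciones (N : Int) : Int := minOpsGo N 0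

-- ===== PORT B =====
def min_operaciones_alt (N : Int) : Int :=
  if N ≤ 0 then 0
  else ((PySem.Int.bitLength N : Int) - 1) + (PySem.Int.bitCount N : Int)

-- ===== PRECONDITION & SPEC =====
def Spec_min_operaciones (N : Int) (out : Int) : Prop := out = min_operaciones_alt N
instance (N : Int) (out : Int) : Decidable (Spec_min_operaciones N out) := by unfold Spec_min_operaciones; infer_instance

-- ===== CLAIM (what is proved, stated in full; the proofs are below) =====
def Claim_equal_min_operaciones : Prop := ∀ (N : Int), Dom_min_operaciones N → Spec_min_operaciones N (min_operaciones N)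

-- ===== LEMMAS AND PROOFS =====

lemma bitLength_pos_of_pos (N : Int) (h : 0 < N) : 0 < PySem.Int.bitLength N := by
  rw [PySem.Int.bitLength_of_pos h]; omega

-- step lemma, even case: for even N > 0, alt N = alt (N // 2) + 1
lemma alt_even (N : Int) (h : 0 < N) (he : PySem.Int.mod N 2 = 0) :
    min_operaciones_alt N = min_operaciones_alt (PySem.Int.floordiv N 2) + 1 := by
  have hfd := PySem.Int.floordiv_mul_add_mod N 2
  rw [he] at hfd
  have hN2 : 2 ≤ N := by
    rcases (PySem.Int.mod_eq_zero_iff_dvd N 2).1 he with ⟨c, hc⟩; omega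
  have hpos : 0 < PySem.Int.floordiv N 2 := by omega
  have hbl := PySem.Int.bitLength_of_pos h
  have hbc := PySem.Int.bitCount_of_pos h
  rw [he] at hbc
  have hblpos := bitLength_pos_of_pos _ hpos
  simp only [min_operaciones_alt, if_neg (by omega : ¬ N ≤ 0), if_neg (by omega : ¬ PySem.Int.floordiv N 2 ≤ 0), hbl, hbc]
  push_cast
  omega

-- step lemma, odd case: for odd N > 0, alt N = alt (N - 1) + 1
lemma alt_odd (N : Int) (h : 0 < N) (ho : ¬ PySem.Int.mod N 2 = 0) :
    min_operaciones_alt N = min_operaciones_alt (N - 1) + 1 := by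
  have hm2 : PySem.Int.mod N 2 = 0 ∨ PySem.Int.mod N 2 = 1 := PySem.Int.mod_two_eq N
  have hm : PySem.Int.mod N 2 = 1 := by tauto
  have hfd := PySem.Int.floordiv_mul_add_mod N 2
  rw [hm] at hfd
  by_cases h1 : N = 1
  · subst h1; decide
  · -- N odd, N ≥ 3
    have hN3 : 3 ≤ N := by omega
    have hfdpos : 0 < PySem.Int.floordiv N 2 := by omega
    -- (N-1) // 2 = N // 2  and  (N-1) % 2 = 0
    have hfdN1 : PySem.Int.floordiv (N - 1) 2 = PySem.Int.floordiv N 2 := by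
      rw [PySem.Int.floordiv_eq_iff_of_pos (by omega)]; omega
    have hmN1 : PySem.Int.mod (N - 1) 2 = 0 := by
      rw [PySem.Int.mod_eq_zero_iff_dvd]
      exact ⟨PySem.Int.floordiv N 2, by omega⟩
    have hblN := PySem.Int.bitLength_of_pos h
    have hbcN := PySem.Int.bitCount_of_pos h
    have hblN1 := PySem.Int.bitLength_of_pos (n := N - 1) (by omega)
    have hbcN1 := PySem.Int.bitCount_of_pos (n := N - 1) (by omega)
    rw [hm] at hbcN
    rw [hmN1, hfdN1] at hbcN1
    rw [hfdN1] at hblN1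
    simp only [min_operaciones_alt, if_neg (by omega : ¬ N ≤ 0), if_neg (by omega : ¬ N - 1 ≤ 0), hblN, hbcN, hblN1, hbcN1]
    push_cast
    omega

lemma alt_nonpos (N : Int) (h : N ≤ 0) : min_operaciones_alt N = 0 := by
  simp [min_operaciones_alt, h]

lemma go_eq (k : Nat) : ∀ (N ops : Int), N.toNat ≤ k → minOpsGo N ops = ops + min_operaciones_alt N := by
  induction k with
  | zero =>
    intro N ops h
    have hN : ¬ N > 0 := by omega
    rw [minOpsGo, if_neg hN, alt_nonpos N (by omega)]; ring
  | succ k ih =>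
    intro N ops h
    by_cases hN : N > 0
    · rw [minOpsGo, if_pos hN]
      by_cases he : PySem.Int.mod N 2 = 0
      · rw [if_pos he]
        have hfd := PySem.Int.floordiv_eq_ediv_of_pos (a := N) (b := 2) (by omega)
        have hlt : (PySem.Int.floordiv N 2).toNat ≤ k := by rw [hfd]; omega
        rw [ih _ _ hlt, alt_even N hN he]; ring
      · rw [if_neg he]
        rw [ih (N - 1) _ (by omega), alt_odd N hN he]; ring
    · rw [minOpsGo, if_neg hN, alt_nonpos N (by omega)]; ring

-- ===== VERDICT (by name: the statement is the Claim_ definition above) =====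
theorem min_operaciones_spec : Claim_equal_min_operaciones := by
  intro N _
  unfold Spec_min_operaciones min_operaciones
  rw [go_eq N.toNat N 0 le_rfl]; ring
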